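-- pv_equiv track=rewrite | github.com/HuSharp/CS61A_Fall_2020 | class07_mutable/lab06/lab06.py | insert_items
-- ===== SOURCE A (Python) =====
-- def insert_items(lst, entry, elem):
--     """
--     >>> test_lst = [1, 5, 8, 5, 2, 3]
--     >>> new_lst = insert_items(test_lst, 5, 7)
--     >>> new_lst
--     [1, 5, 7, 8, 5, 7, 2, 3]
--     >>> large_lst = [1, 4, 8]
--     >>> large_lst2 = insert_items(large_lst, 4, 4)
--     >>> large_lst2
--     [1, 4, 4, 8]
--     >>> large_lst3 = insert_items(large_lst2, 4, 6)
--     >>> large_lst3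
--     [1, 4, 6, 4, 6, 8]
--     >>> large_lst3 is large_lst
--     True
--     """
--     "*** YOUR CODE HERE ***"
--     # pos = []
--     # for i in range(len(lst)):
--     #     if lst[i] == entry:
--     #         pos.append(i)
--     # 上面代码修改如下
--     '''
--     enumerate 用法
--     >>> seasons = ['Spring', 'Summer', 'Fall', 'Winter']
--     >>> list(enumerate(seasons))
--     [(0, 'Spring'), (1, 'Summer'), (2, 'Fall'), (3, 'Winter')]
--     >>> list(enumerate(seasons, start=1))       # 下标从 1 开始
--     [(1, 'Spring'), (2, 'Summer'), (3, 'Fall'), (4, 'Winter')]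
--     '''
--     pos = [i for i, x in enumerate(lst) if x == entry]
--
--     for i in range(len(pos)):
--         lst[ pos[i] + i + 1 : pos[i] + i + 1 ] = [elem]
--     return lst
-- ===== SOURCE B (Python) =====
-- def insert_items(lst, entry, elem):
--     # Single pass; no position list, no offset arithmetic: copy each element,
--     # appending elem right after every match.
--     # lst[:] = ... keeps the in-place mutation / object identity of A.
--     out = []
--     for x in lst:
--         out.append(x)
--         if x == entry:
--             out.append(elem)
--     lst[:] = out
--     return lst
-- ===== Notes on version B (the rewrite author's own statement) =====
-- stated objective: simpler
-- what changed: Replaces A's two-phase scheme (collect all match indices, then re-index with a +i offset correction for each earlier insertion) by one structural pass that emits each element and appends elem right after a match; no index list and no offset arithmetic remain.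
import Mathlib
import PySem

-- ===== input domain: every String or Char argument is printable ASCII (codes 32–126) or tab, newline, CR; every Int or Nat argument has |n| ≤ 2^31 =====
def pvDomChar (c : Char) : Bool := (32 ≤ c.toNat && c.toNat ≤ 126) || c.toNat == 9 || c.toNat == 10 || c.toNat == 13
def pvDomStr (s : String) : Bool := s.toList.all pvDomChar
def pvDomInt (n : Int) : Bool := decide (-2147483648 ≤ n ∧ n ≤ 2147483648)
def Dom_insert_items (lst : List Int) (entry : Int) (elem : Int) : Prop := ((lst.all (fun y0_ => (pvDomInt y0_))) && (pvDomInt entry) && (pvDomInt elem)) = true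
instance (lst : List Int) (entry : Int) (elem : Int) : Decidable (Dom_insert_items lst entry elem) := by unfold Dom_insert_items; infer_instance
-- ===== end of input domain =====

-- B replaces A's index-collection pass + offset-corrected slice assignments by one
-- structural pass that emits elem after each match; equivalence of return values is
-- proved (both Pythons mutate lst in place identically, returning the same object).


-- ===== PORT A =====
-- pos = [i for i, x in enumerate(lst) if x == entry]
-- for i in range(len(pos)): lst[pos[i]+i+1 : pos[i]+i+1] = [elem]
-- pos[i] is ported as getD (i is always in range); the slice-assignment index
-- pos[i]+i+1 is ≥ 1, so .toNat is exact there.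
def pvPosA (lst : List Int) (entry : Int) : List Int :=
  (PySem.List.enumerate lst 0).foldl
    (fun acc p => if p.2 = entry then acc ++ [p.1] else acc) []

def insert_items (lst : List Int) (entry : Int) (elem : Int) : List Int :=
  (List.range (pvPosA lst entry).length).foldl
    (fun cur i =>
      let k : Int := (pvPosA lst entry).getD i 0 + (i : Int) + 1
      cur.take k.toNat ++ elem :: cur.drop k.toNat) lst

-- ===== PORT B =====
-- one pass: append each element to out, appending elem right after a match
def insert_items_alt (lst : List Int) (entry : Int) (elem : Int) : List Int :=
  lst.foldl (fun out x =>
    let out := out ++ [x]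
    if x = entry then out ++ [elem] else out) []

-- ===== PRECONDITION & SPEC =====
def Spec_insert_items (lst : List Int) (entry : Int) (elem : Int) (out : List Int) : Prop := out = insert_items_alt lst entry elem
instance (lst : List Int) (entry : Int) (elem : Int) (out : List Int) : Decidable (Spec_insert_items lst entry elem out) := by unfold Spec_insert_items; infer_instance

-- ===== CLAIM (what is proved, stated in full; the proofs are below) =====
def Claim_equal_insert_items : Prop := ∀ (lst : List Int) (entry : Int) (elem : Int), Dom_insert_items lst entry elem → Spec_insert_items lst entry elem (insert_items lst entry elem)

-- ===== LEMMAS AND PROOFS =====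

-- recursive characterisation of B's one-pass loop
def insAlt (entry : Int) (elem : Int) : List Int → List Int
  | [] => []
  | x :: xs => if x = entry then x :: elem :: insAlt entry elem xs
               else x :: insAlt entry elem xs

lemma alt_eq_insAlt (entry elem : Int) (lst : List Int) : ∀ acc : List Int,
    lst.foldl (fun out x =>
      let out := out ++ [x]
      if x = entry then out ++ [elem] else out) acc = acc ++ insAlt entry elem lst := by
  induction lst with
  | nil => intro acc; simp [insAlt]
  | cons x xs ih =>
    intro acc
    rw [List.foldl_cons, ih]
    by_cases hx : x = entry <;> simp [insAlt, hx]

-- the match positions of A's comprehension, as naturals, computed structurally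
def pvPos (entry : Int) : List Int → List Nat
  | [] => []
  | x :: xs => if x = entry then 0 :: (pvPos entry xs).map (· + 1)
               else (pvPos entry xs).map (· + 1)

-- A's insertion loop, recast as recursion over the (nat) position list with counter i
def pvG (elem : Int) : List Nat → Nat → List Int → List Int
  | [], _, cur => cur
  | p :: ps, i, cur => pvG elem ps (i + 1) (cur.take (p + i + 1) ++ elem :: cur.drop (p + i + 1))

lemma pos_eq (entry : Int) (xs : List Int) : ∀ s : Int,
    ((PySem.List.enumerate xs s).filter (fun p => p.2 = entry)).map Prod.fst
      = List.map (fun n : Nat => s + (n : Int)) (pvPos entry xs) := by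
  induction xs with
  | nil => intro s; simp [pvPos, PySem.List.enumerate_nil]
  | cons x xs ih =>
    intro s
    rw [PySem.List.enumerate_cons, List.filter_cons]
    by_cases hx : x = entry
    · simp [pvPos, hx, ih (s + 1)]
      intro a _; omega
    · simp [pvPos, hx, ih (s + 1)]
      intro a _; omega

-- unrolling A's range-indexed fold into pvG, tracking the suffix of the full list
lemma rangeFold (elem : Int) (full : List Nat) :
    ∀ (ps : List Nat) (j : Nat) (cur : List Int), full.drop j = ps →
    (List.range' j ps.length).foldl
      (fun cur i =>
        let k : Int := (full.map (Int.ofNat)).getD i 0 + (i : Int) + 1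
        cur.take k.toNat ++ elem :: cur.drop k.toNat) cur
      = pvG elem ps j cur := by
  intro ps
  induction ps with
  | nil => intro j cur _; simp [pvG]
  | cons p ps ih =>
    intro j cur hdrop
    have hj : full[j]? = some p := by
      have : (full.drop j)[0]? = full[j]? := by simp [List.getElem?_drop]
      rw [← this, hdrop]; rfl
    have hget : (full.map (Int.ofNat)).getD j 0 = (p : Int) := by
      simp [List.getD, List.getElem?_map, hj]
    have hdrop' : full.drop (j + 1) = ps := by
      have h2 := congrArg (List.drop 1) hdrop
      simpa [List.drop_drop, Nat.add_comm] using h2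
    have hk : ((p : Int) + (j : Int) + 1).toNat = p + j + 1 := by omega
    simp only [List.length_cons, List.range'_succ, List.foldl_cons, hget, hk, pvG]
    exact ih (j + 1) _ hdrop'

lemma pvG_shift (elem : Int) (ps : List Nat) :
    ∀ (i : Nat) (x : Int) (cur : List Int),
    pvG elem (ps.map (· + 1)) i (x :: cur) = x :: pvG elem ps i cur := by
  induction ps with
  | nil => intro i x cur; simp [pvG]
  | cons p ps ih =>
    intro i x cur
    have h : p + 1 + i + 1 = (p + i + 1) + 1 := by omega
    simp only [List.map_cons, pvG, h, List.take_succ_cons, List.drop_succ_cons, List.cons_append]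
    exact ih (i + 1) x _

lemma pvG_counter (elem : Int) (ps : List Nat) :
    ∀ (i : Nat) (x : Int) (cur : List Int),
    pvG elem ps (i + 1) (x :: cur) = x :: pvG elem ps i cur := by
  induction ps with
  | nil => intro i x cur; simp [pvG]
  | cons p ps ih =>
    intro i x cur
    have h : p + (i + 1) + 1 = (p + i + 1) + 1 := by omega
    simp only [pvG, h, List.take_succ_cons, List.drop_succ_cons, List.cons_append]
    exact ih (i + 1) x _

lemma pvG_pos (entry elem : Int) (lst : List Int) :
    pvG elem (pvPos entry lst) 0 lst = insAlt entry elem lst := by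
  induction lst with
  | nil => simp [pvPos, pvG, insAlt]
  | cons x xs ih =>
    by_cases hx : x = entry
    · simp only [pvPos, insAlt, hx, if_true, pvG,
        List.take_succ_cons, List.take_zero, List.drop_succ_cons, List.drop_zero,
        List.cons_append, List.nil_append]
      rw [pvG_counter, pvG_shift, ih]
    · simp only [pvPos, insAlt, if_neg hx]
      rw [pvG_shift, ih]

lemma pvPosA_eq (lst : List Int) (entry : Int) :
    pvPosA lst entry = (pvPos entry lst).map (Int.ofNat) := by
  unfold pvPosA
  rw [PySem.List.foldl_append_ite (p := fun q => q.2 = entry) (f := Prod.fst)]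
  rw [List.nil_append, pos_eq entry lst 0]
  apply List.map_congr_left; intro n _; simp

lemma ports_agree (lst : List Int) (entry elem : Int) :
    insert_items lst entry elem = insert_items_alt lst entry elem := by
  unfold insert_items insert_items_alt
  rw [alt_eq_insAlt, List.nil_append, pvPosA_eq, List.length_map, List.range_eq_range',
      rangeFold elem (pvPos entry lst) (pvPos entry lst) 0 lst (by simp), pvG_pos]

-- ===== VERDICT (by name: the statement is the Claim_ definition above) =====
theorem insert_items_spec : Claim_equal_insert_items := by
  intro lst entry elem _
  unfold Spec_insert_items
  exact ports_agree lst entry elem
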